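-- pv_equiv track=rewrite | github.com/tediferJones/google-foobar | level3-problem3/despair/hackermanEdition.py | getNewMatrixFormat
-- ===== SOURCE A (Python) =====
-- def getNewMatrixFormat(m):
--     absorbing = []
--     transient = []
--     for rowIndex in range(len(m)):
--         if m[rowIndex] == [0] * len(m[rowIndex]):
--             absorbing.append(rowIndex)
--         else:
--             transient.append(rowIndex)
--     return absorbing + transient
-- ===== SOURCE B (Python) =====
-- def getNewMatrixFormat(m):
--     return sorted(range(len(m)), key=lambda i: m[i] != [0] * len(m[i]))
-- ===== Notes on version B (the rewrite author's own statement) =====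
-- stated objective: idiomatic
-- what changed: Replaces the explicit two-accumulator partition loop with a single stable sort of the row indices keyed on the all-zero test; stability makes zero rows come first in original order.
import Mathlib
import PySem

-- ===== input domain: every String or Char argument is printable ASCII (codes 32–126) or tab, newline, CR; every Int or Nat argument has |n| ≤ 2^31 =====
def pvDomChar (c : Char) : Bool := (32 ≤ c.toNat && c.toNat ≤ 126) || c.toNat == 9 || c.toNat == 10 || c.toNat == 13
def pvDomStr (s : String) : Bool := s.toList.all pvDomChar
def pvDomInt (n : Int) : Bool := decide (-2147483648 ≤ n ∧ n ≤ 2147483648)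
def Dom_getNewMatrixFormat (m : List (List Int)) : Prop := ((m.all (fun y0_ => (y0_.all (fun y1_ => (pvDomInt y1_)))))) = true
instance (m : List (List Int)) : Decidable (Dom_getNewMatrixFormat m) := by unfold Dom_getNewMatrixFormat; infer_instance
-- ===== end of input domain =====

-- B replaces A's explicit two-accumulator partition loop with one stable sort of the
-- indices keyed on "row is not all zeros" (idiomatic; same return value, no speed claim).

-- ===== PORT A =====
-- the loop body: state = (absorbing, transient); m[rowIndex] is always in range,
-- pyGet? … |>.getD [] is exact here
def getNewMatrixFormat (m : List (List Int)) : List Int :=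
  let st :=
    (PySem.List.pyRange 0 m.length 1).foldl
      (fun (st : List Int × List Int) rowIndex =>
        let row := (PySem.List.pyGet? m rowIndex).getD []
        if row = List.replicate row.length 0 then (st.1 ++ [rowIndex], st.2)
        else (st.1, st.2 ++ [rowIndex]))
      ([], [])
  st.1 ++ st.2

-- ===== PORT B =====
-- key(i) = (m[i] != [0]*len(m[i])); m[i] always in range on range(len(m))
def pvKeyB (m : List (List Int)) (i : Int) : Bool :=
  let row := (PySem.List.pyGet? m i).getD []
  decide (row ≠ List.replicate row.length 0)

def getNewMatrixFormat_alt (m : List (List Int)) : List Int :=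
  PySem.List.sorted (PySem.List.pyRange 0 m.length 1) (pvKeyB m) false

-- ===== PRECONDITION & SPEC =====
def Spec_getNewMatrixFormat (m : List (List Int)) (out : List Int) : Prop := out = getNewMatrixFormat_alt m
instance (m : List (List Int)) (out : List Int) : Decidable (Spec_getNewMatrixFormat m out) := by unfold Spec_getNewMatrixFormat; infer_instance

-- ===== CLAIM (what is proved, stated in full; the proofs are below) =====
def Claim_equal_getNewMatrixFormat : Prop := ∀ (m : List (List Int)), Dom_getNewMatrixFormat m → Spec_getNewMatrixFormat m (getNewMatrixFormat m)

-- ===== LEMMAS AND PROOFS =====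

-- inserting x into a list split as (all-false keys) ++ (all-true keys):
-- a true-key x goes to the very end, a false-key x goes right between the two blocks
theorem pv_insertBy_partition {α : Type} (k : α → Bool) (x : α) (A B : List α)
    (hA : ∀ y ∈ A, k y = false) (hB : ∀ y ∈ B, k y = true) :
    PySem.List.insertBy (fun a b => decide (k a < k b)) x (A ++ B) =
      if k x then (A ++ B) ++ [x] else A ++ x :: B := by
  by_cases hx : k x
  · simp only [hx, if_pos]
    apply PySem.List.insertBy_of_forall_not_before
    intro y hy
    simp only [decide_eq_false_iff_not]
    rcases List.mem_append.mp hy with h | h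
    · simp [hx, hA y h, Bool.lt_iff]
    · simp [hx, hB y h]
  · have hx' : k x = false := by simp at hx; exact hx
    rw [if_neg hx]
    induction A with
    | nil =>
      cases B with
      | nil => simp [PySem.List.insertBy]
      | cons y ys =>
        have : k y = true := hB y (List.mem_cons_self ..)
        simp [PySem.List.insertBy, hx', this, Bool.lt_iff]
    | cons a A ih =>
      have ha : k a = false := hA a (List.mem_cons_self ..)
      have hd : (decide (k x < k a)) = false := by simp [hx', ha]
      simp only [List.cons_append, PySem.List.insertBy, hd, Bool.false_eq_true, if_false]
      rw [ih (fun y hy => hA y (List.mem_cons_of_mem _ hy))]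

-- a stable sort on a Bool key is the stable partition: false-key elements first
theorem pv_sorted_bool_partition {α : Type} (k : α → Bool) (xs : List α) :
    PySem.List.sorted xs k false = xs.filter (fun x => !k x) ++ xs.filter k := by
  rw [PySem.List.sorted_eq_foldl_insertBy]
  induction xs using List.reverseRecOn with
  | nil => simp
  | append_singleton xs x ih =>
    rw [List.foldl_append, List.foldl_cons, List.foldl_nil, ih,
        pv_insertBy_partition k x _ _
          (fun y hy => by simpa using (List.of_mem_filter hy))
          (fun y hy => List.of_mem_filter hy)]
    by_cases hx : k x <;> simp [hx, List.filter_append]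

-- A's loop accumulates exactly the two filters
theorem pv_foldA (m : List (List Int)) (R : List Int) (a t : List Int) :
    R.foldl
      (fun (st : List Int × List Int) rowIndex =>
        let row := (PySem.List.pyGet? m rowIndex).getD []
        if row = List.replicate row.length 0 then (st.1 ++ [rowIndex], st.2)
        else (st.1, st.2 ++ [rowIndex]))
      (a, t) =
    (a ++ R.filter (fun i => !pvKeyB m i), t ++ R.filter (pvKeyB m)) := by
  induction R generalizing a t with
  | nil => simp
  | cons i R ih =>
    simp only [List.foldl_cons]
    by_cases h : ((PySem.List.pyGet? m i).getD []) =
        List.replicate ((PySem.List.pyGet? m i).getD []).length 0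
    · have hk : pvKeyB m i = false := by
        show decide (((PySem.List.pyGet? m i).getD []) ≠
          List.replicate ((PySem.List.pyGet? m i).getD []).length 0) = false
        exact decide_eq_false (not_not_intro h)
      have hstep : (let row := (PySem.List.pyGet? m i).getD [];
            if row = List.replicate row.length 0 then ((a, t).1 ++ [i], (a, t).2)
            else ((a, t).1, (a, t).2 ++ [i])) = (a ++ [i], t) := by
        show (if ((PySem.List.pyGet? m i).getD []) =
            List.replicate ((PySem.List.pyGet? m i).getD []).length 0
          then (a ++ [i], t) else (a, t ++ [i])) = (a ++ [i], t)
        rw [if_pos h]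
      rw [hstep, ih]
      simp [hk]
    · have hk : pvKeyB m i = true := by simp [pvKeyB, h]
      have hstep : (let row := (PySem.List.pyGet? m i).getD [];
            if row = List.replicate row.length 0 then ((a, t).1 ++ [i], (a, t).2)
            else ((a, t).1, (a, t).2 ++ [i])) = (a, t ++ [i]) := by
        show (if ((PySem.List.pyGet? m i).getD []) =
            List.replicate ((PySem.List.pyGet? m i).getD []).length 0
          then (a ++ [i], t) else (a, t ++ [i])) = (a, t ++ [i])
        rw [if_neg h]
      rw [hstep, ih]
      simp [hk]

-- ===== VERDICT (by name: the statement is the Claim_ definition above) =====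
theorem getNewMatrixFormat_spec : Claim_equal_getNewMatrixFormat := by
  intro m _
  show getNewMatrixFormat m = getNewMatrixFormat_alt m
  rw [getNewMatrixFormat, getNewMatrixFormat_alt, pv_sorted_bool_partition]
  simp only [pv_foldA m _ [] []]
  simp
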